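-- pv_equiv track=rewrite | github.com/sermmor/Pdfepub | src/modeloCreaEpub.py | getNameSeccion
-- ===== SOURCE A (Python) =====
-- def getNameSeccion(iNumeroSeccion):
-- 	ret = "Section"
-- 	# Averiguo el número de cifras de iNumeroSeccion. El truco está en ir haciendo modulo de potencia de 10 hasta que dé la misma cifra que iNumeroSeccion.
-- 	iNumCifras = 1
-- 	while (iNumeroSeccion%(10**iNumCifras) != iNumeroSeccion):
-- 		iNumCifras = iNumCifras + 1
--
-- 	# Son 4 los ceros entre "Section" y ".xhtml", hay que calcular cuántos ceros hacen falta.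
-- 	iNumCeros = 4 - iNumCifras
--
-- 	# Añadir ceros.
-- 	for i in range(iNumCeros):
-- 		ret = ret + "0"
--
-- 	# Añadimos a lo que tenemos el número de la sección pasado a cadena y la extensión del fichero.
-- 	return ret + str(iNumeroSeccion) + ".xhtml"
-- ===== SOURCE B (Python) =====
-- def getNameSeccion(iNumeroSeccion):
-- 	return "Section" + str(iNumeroSeccion).zfill(4) + ".xhtml"
-- ===== Notes on version B (the rewrite author's own statement) =====
-- stated objective: idiomatic
-- what changed: Replaces the manual modulo-power-of-10 digit-count while-loop and the zero-appending for-loop with a single str.zfill(4) left-padding of the decimal string.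
import Mathlib
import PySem

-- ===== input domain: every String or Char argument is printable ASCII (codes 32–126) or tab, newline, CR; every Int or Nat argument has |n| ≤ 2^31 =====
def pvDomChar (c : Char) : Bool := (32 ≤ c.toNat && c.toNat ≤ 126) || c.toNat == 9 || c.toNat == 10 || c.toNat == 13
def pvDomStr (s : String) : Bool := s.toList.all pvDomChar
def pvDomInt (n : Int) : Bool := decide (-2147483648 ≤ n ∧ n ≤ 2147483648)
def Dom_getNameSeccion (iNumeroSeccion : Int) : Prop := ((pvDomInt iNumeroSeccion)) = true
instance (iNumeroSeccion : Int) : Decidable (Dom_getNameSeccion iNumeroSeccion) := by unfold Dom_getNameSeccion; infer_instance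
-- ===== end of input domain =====

-- B replaces A's digit-count while-loop and zero-appending for-loop with a single zfill(4); idiomatic, same cost.


-- ===== PORT A =====
-- Python's `while (iNumeroSeccion%(10**iNumCifras) != iNumeroSeccion): iNumCifras += 1`,
-- with fuel to make it total (40 steps suffice for any |n| ≤ 2^31; for n < 0, outside Pre_,
-- the Python loop never terminates).
def pvCifrasLoop (n : Int) : Nat → Nat → Nat
  | 0, k => k
  | fuel + 1, k =>
    if PySem.Int.mod n ((10 : Int) ^ k) ≠ n then pvCifrasLoop n fuel (k + 1) else k

def getNameSeccion (iNumeroSeccion : Int) : String :=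
  let ret := "Section"
  let iNumCifras : Nat := pvCifrasLoop iNumeroSeccion 40 1
  let iNumCeros : Int := 4 - (iNumCifras : Int)
  let ret := (PySem.List.pyRange 0 iNumCeros 1).foldl (fun r _ => r ++ "0") ret
  ret ++ PySem.Int.toStr iNumeroSeccion ++ ".xhtml"

-- ===== PORT B =====
def getNameSeccion_alt (iNumeroSeccion : Int) : String :=
  "Section" ++ PySem.Str.zfill (PySem.Int.toStr iNumeroSeccion) 4 ++ ".xhtml"

-- ===== PRECONDITION & SPEC =====
-- Pre_ excludes negative section numbers, on which Python A's digit-count while-loop never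
-- terminates (n % 10**k is non-negative and never equals a negative n), so A returns nothing there.
def Pre_getNameSeccion (iNumeroSeccion : Int) : Prop := 0 ≤ iNumeroSeccion
instance (iNumeroSeccion : Int) : Decidable (Pre_getNameSeccion iNumeroSeccion) := by
  unfold Pre_getNameSeccion; infer_instance

def pvWitness_getNameSeccion : Int := 7

def Spec_getNameSeccion (iNumeroSeccion : Int) (out : String) : Prop := out = getNameSeccion_alt iNumeroSeccion
instance (iNumeroSeccion : Int) (out : String) : Decidable (Spec_getNameSeccion iNumeroSeccion out) := by unfold Spec_getNameSeccion; infer_instance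

-- ===== CLAIM (what is proved, stated in full; the proofs are below) =====
def Claim_equal_getNameSeccion : Prop := ∀ (iNumeroSeccion : Int), Dom_getNameSeccion iNumeroSeccion → Pre_getNameSeccion iNumeroSeccion → Spec_getNameSeccion iNumeroSeccion (getNameSeccion iNumeroSeccion)

-- ===== LEMMAS AND PROOFS =====

-- The digit-count loop computes log₁₀ + 1, given enough fuel.
theorem pvCifrasLoop_eq (n : Int) (hn : 0 ≤ n) :
    ∀ (fuel k : Nat), 1 ≤ k → n < (10 : Int) ^ (k + fuel) →
      pvCifrasLoop n fuel k = if n < (10 : Int) ^ k then k else Nat.log 10 n.toNat + 1 := by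
  intro fuel
  induction fuel with
  | zero =>
    intro k hk hlt
    simp only [Nat.add_zero] at hlt
    simp [pvCifrasLoop, if_pos hlt]
  | succ f ih =>
    intro k hk hlt
    have hpow : (0 : Int) < (10 : Int) ^ k := by positivity
    have hfmod : Int.fmod n ((10 : Int) ^ k) = n % ((10 : Int) ^ k) := by
      rw [Int.fmod_eq_emod]
      simp [le_of_lt hpow]
    by_cases hcase : n < (10 : Int) ^ k
    · have hemod : n % ((10 : Int) ^ k) = n := Int.emod_eq_of_lt hn hcase
      simp [pvCifrasLoop, PySem.Int.mod, hfmod, hemod, if_pos hcase]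
    · have hne : ¬ (n % ((10 : Int) ^ k) = n) := by
        have h1 := Int.emod_lt_of_pos n hpow
        omega
      have hstep : pvCifrasLoop n (f + 1) k = pvCifrasLoop n f (k + 1) := by
        simp [pvCifrasLoop, PySem.Int.mod, hfmod, hne]
      rw [hstep, ih (k + 1) (by omega) (by rw [show k + 1 + f = k + (f + 1) by omega]; exact hlt)]
      rw [if_neg hcase]
      by_cases h2 : n < (10 : Int) ^ (k + 1)
      · rw [if_pos h2]
        have e1 : (10 : Nat) ^ k ≤ n.toNat := by
          have h : (((10 : Nat) ^ k : Nat) : Int) ≤ n := by exact_mod_cast not_lt.mp hcase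
          omega
        have e2 : n.toNat < (10 : Nat) ^ (k + 1) := by
          have h : n < (((10 : Nat) ^ (k + 1) : Nat) : Int) := by exact_mod_cast h2
          omega
        have hlog : Nat.log 10 n.toNat = k := Nat.log_eq_of_pow_le_of_lt_pow e1 e2
        omega
      · rw [if_neg h2]

-- Exact length of Nat.toDigitsCore (base 10) with sufficient fuel.
theorem toDigitsCore_len (fuel : Nat) :
    ∀ (n : Nat) (ds : List Char), n < fuel →
      (Nat.toDigitsCore 10 fuel n ds).length = Nat.log 10 n + 1 + ds.length := by
  induction fuel with
  | zero => intro n ds h; omega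
  | succ f ih =>
    intro n ds h
    by_cases hz : n / 10 = 0
    · have hn10 : n < 10 := by omega
      simp [Nat.toDigitsCore, hz, Nat.log_eq_zero_iff.mpr (Or.inl hn10)]
      omega
    · have hge : 10 ≤ n := by
        by_contra hlt
        exact hz (Nat.div_eq_of_lt (by omega))
      have hrec : Nat.toDigitsCore 10 (f + 1) n ds
          = Nat.toDigitsCore 10 f (n / 10) (Nat.digitChar (n % 10) :: ds) := by
        simp [Nat.toDigitsCore, hz]
      rw [hrec, ih (n / 10) _ (by omega)]
      have hlogpos : 0 < Nat.log 10 n := Nat.log_pos (by norm_num) hge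
      have := Nat.log_div_base 10 n
      simp only [List.length_cons]
      omega

-- The leading character of Nat.toDigitsCore is a digit character (never a sign).
theorem toDigitsCore_head (fuel : Nat) :
    ∀ (n : Nat) (ds : List Char), n < fuel →
      ∃ m tl, m < 10 ∧ Nat.toDigitsCore 10 fuel n ds = Nat.digitChar m :: tl := by
  induction fuel with
  | zero => intro n ds h; omega
  | succ f ih =>
    intro n ds h
    by_cases hz : n / 10 = 0
    · exact ⟨n % 10, ds, by omega, by simp [Nat.toDigitsCore, hz]⟩
    · have hge : 10 ≤ n := by
        by_contra hlt
        exact hz (Nat.div_eq_of_lt (by omega))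
      obtain ⟨m, tl, hm, heq⟩ := ih (n / 10) (Nat.digitChar (n % 10) :: ds) (by omega)
      exact ⟨m, tl, hm, by simp [Nat.toDigitsCore, hz]; exact heq⟩

theorem digitChar_not_sign (m : Nat) (hm : m < 10) :
    Nat.digitChar m ≠ '+' ∧ Nat.digitChar m ≠ '-' := by
  interval_cases m <;> decide

-- For 0 ≤ n, toChars is the core digit list, nonempty, digit-headed, of length log₁₀+1.
theorem toChars_of_nonneg (n : Int) (hn : 0 ≤ n) :
    PySem.Int.toChars n = Nat.toDigits 10 n.toNat := by
  unfold PySem.Int.toChars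
  rw [if_neg (by omega)]

theorem toChars_len (n : Int) (hn : 0 ≤ n) :
    (PySem.Int.toChars n).length = Nat.log 10 n.toNat + 1 := by
  rw [toChars_of_nonneg n hn]
  unfold Nat.toDigits
  rw [toDigitsCore_len (n.toNat + 1) n.toNat [] (by omega)]
  simp

theorem toChars_shape (n : Int) (hn : 0 ≤ n) :
    ∃ c tl, PySem.Int.toChars n = c :: tl ∧ c ≠ '+' ∧ c ≠ '-' := by
  rw [toChars_of_nonneg n hn]
  unfold Nat.toDigits
  obtain ⟨m, tl, hm, heq⟩ := toDigitsCore_head (n.toNat + 1) n.toNat [] (by omega)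
  exact ⟨Nat.digitChar m, tl, heq, (digitChar_not_sign m hm).1, (digitChar_not_sign m hm).2⟩

-- zfill with a digit-headed list is just left-padding with zeros.
theorem zfill_digits (cs : List Char) (c : Char) (tl : List Char)
    (hcs : cs = c :: tl) (h1 : c ≠ '+') (h2 : c ≠ '-') :
    PySem.Chars.zfill cs 4 = List.replicate (4 - cs.length) '0' ++ cs := by
  subst hcs
  unfold PySem.Chars.zfill
  by_cases hlen : (4 : Int) ≤ ((c :: tl).length : Int)
  · rw [if_pos hlen]
    have hlen' : (4 : Nat) ≤ (c :: tl).length := by exact_mod_cast hlen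
    rw [Nat.sub_eq_zero_of_le hlen']
    simp
  · rw [if_neg hlen]
    have hns : ¬ (c = '+' ∨ c = '-') := by tauto
    simp only [hns, if_false]
    have h4 : ((4 : Int)).toNat = 4 := by decide
    rw [h4]

-- Appending "0" once per element of a list is appending a replicate.
theorem foldl_zeros (l : List Int) :
    ∀ (ret : String), (l.foldl (fun r _ => r ++ "0") ret).toList
      = ret.toList ++ List.replicate l.length '0' := by
  induction l with
  | nil => intro ret; simp
  | cons x xs ih =>
    intro ret
    simp only [List.foldl_cons, List.length_cons, ih]
    simp [List.replicate_succ]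

-- ===== VERDICT (by name: the statement is the Claim_ definition above) =====
theorem getNameSeccion_spec : Claim_equal_getNameSeccion := by
  intro n hdom hpre
  unfold Spec_getNameSeccion getNameSeccion getNameSeccion_alt
  have hn : 0 ≤ n := hpre
  have hbound : n ≤ 2147483648 := by
    unfold Dom_getNameSeccion pvDomInt at hdom
    simp at hdom; omega
  set L : Nat := Nat.log 10 n.toNat + 1 with hL
  have hcif : pvCifrasLoop n 40 1 = L := by
    rw [pvCifrasLoop_eq n hn 40 1 (by omega) (by norm_num; omega)]
    by_cases h10 : n < (10 : Int) ^ 1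
    · rw [if_pos h10, hL, Nat.log_eq_zero_iff.mpr (Or.inl (by omega))]
    · rw [if_neg h10]
  have hlen : (PySem.Int.toChars n).length = L := toChars_len n hn
  apply String.ext  -- equal data ⇒ equal strings
  show (_ : String).toList = (_ : String).toList
  rw [hcif]
  simp only [String.toList_append, PySem.Str.toList_zfill, PySem.Int.toList_toStr]
  rw [foldl_zeros]
  obtain ⟨c, tl, hcs, h1, h2⟩ := toChars_shape n hn
  rw [zfill_digits _ c tl hcs h1 h2, hlen]
  rw [PySem.List.length_pyRange_one]
  have : ((4 : Int) - (L : Int) - 0).toNat = 4 - L := by omega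
  rw [this]
  ac_rfl
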